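-- pv_equiv track=rewrite | github.com/FelixIllanes/Batalla-Naval | batalla_naval.py | validar_x
-- ===== SOURCE A (Python) =====
-- FILAS = 10
--
-- COLUMNAS = 10
--
-- MAR = " "
--
-- def es_mar(x, y, matriz):
--     return matriz[y][x] == MAR
--
-- def en_rango(x, y):
--     return x >= 0 and x <= COLUMNAS-1 and y >= 0 and y <= FILAS-1
--
-- def validar_x(x,y,matriz, tamaño):
--     aux = 1
--     resp = True
--     while aux <= tamaño:
--         if en_rango(x,y) and es_mar(x,y,matriz):
--             x += 1
--             aux += 1
--         else:
--             return False
--     return resp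
-- ===== SOURCE B (Python) =====
-- FILAS = 10
--
-- COLUMNAS = 10
--
-- MAR = " "
--
-- def validar_x(x, y, matriz, tamaño):
--     if tamaño <= 0:
--         return True
--     if x < 0 or x + tamaño > COLUMNAS or y < 0 or y >= FILAS:
--         return False
--     return matriz[y][x:x + tamaño] == [MAR] * tamaño
-- ===== Notes on version B (the rewrite author's own statement) =====
-- stated objective: simpler
-- what changed: Replaces A's counter-driven while loop that tests each cell's bounds and sea status one by one (advancing x and aux by hand) with a loop-free formulation: a closed-form bounds check on the whole span, then one list slice matriz[y][x:x+tamaño] compared for equality against the constant list [MAR]*tamaño.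
import Mathlib
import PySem

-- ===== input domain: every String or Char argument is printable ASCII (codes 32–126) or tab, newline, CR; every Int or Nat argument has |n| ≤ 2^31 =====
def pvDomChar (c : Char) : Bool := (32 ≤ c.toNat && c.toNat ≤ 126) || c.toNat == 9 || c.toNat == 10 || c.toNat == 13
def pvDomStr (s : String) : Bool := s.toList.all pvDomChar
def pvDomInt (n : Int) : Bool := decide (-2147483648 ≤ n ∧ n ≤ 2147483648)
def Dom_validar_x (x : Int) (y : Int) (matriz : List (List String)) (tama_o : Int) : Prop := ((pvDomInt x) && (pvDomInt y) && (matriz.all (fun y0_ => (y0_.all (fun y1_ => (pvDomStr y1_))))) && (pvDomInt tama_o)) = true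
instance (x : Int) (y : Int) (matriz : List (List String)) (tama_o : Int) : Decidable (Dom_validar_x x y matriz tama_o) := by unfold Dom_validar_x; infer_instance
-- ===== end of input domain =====

-- B replaces A's per-cell bounds-and-sea while-loop by a closed-form bounds check plus ONE
-- slice-and-compare: matriz[y][x:x+tamaño] == [MAR]*tamaño — no per-cell loop (objective: simpler).

-- ===== PORT A =====
def pvFILAS : Int := 10
def pvCOLUMNAS : Int := 10
def pvMAR : String := " "

-- matriz[y][x] == MAR; the double index is PySem.List.pyGet?; inside Pre_ the access never
-- hits none, so the .getD "" default is never the decisive value (exact there)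
def es_mar (x : Int) (y : Int) (matriz : List (List String)) : Bool :=
  (((PySem.List.pyGet? matriz y).bind (fun r => PySem.List.pyGet? r x)).getD "") == pvMAR

def en_rango (x : Int) (y : Int) : Bool :=
  decide (x ≥ 0) && decide (x ≤ pvCOLUMNAS - 1) && decide (y ≥ 0) && decide (y ≤ pvFILAS - 1)

-- the while-loop of A, state (aux, x); fuel only makes the recursion structural
-- (fuel ≥ the remaining iterations, so the `aux ≤ tama_o` test always exits first)
def validarXLoop (y : Int) (matriz : List (List String)) (tama_o : Int) : Nat → Int → Int → Bool
  | 0, _, _ => true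
  | fuel + 1, aux, x =>
    if aux ≤ tama_o then
      if en_rango x y && es_mar x y matriz then
        validarXLoop y matriz tama_o fuel (aux + 1) (x + 1)
      else false
    else true

def validar_x (x : Int) (y : Int) (matriz : List (List String)) (tama_o : Int) : Bool :=
  validarXLoop y matriz tama_o tama_o.toNat 1 x

-- ===== PORT B =====
-- matriz[y] is PySem.List.pyGet?; inside Pre_ the bounds-checked access never hits none,
-- so the .getD [] default is never the decisive value (exact there)
def validar_x_alt (x : Int) (y : Int) (matriz : List (List String)) (tama_o : Int) : Bool :=
  if tama_o ≤ 0 then true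
  else if decide (x < 0) || decide (x + tama_o > pvCOLUMNAS) || decide (y < 0) || decide (y ≥ pvFILAS) then false
  else
    PySem.List.slice ((PySem.List.pyGet? matriz y).getD []) (some x) (some (x + tama_o))
      == List.replicate tama_o.toNat pvMAR

-- ===== PRECONDITION & SPEC =====
-- Pre_ excludes exactly the inputs on which A raises IndexError: tamaño ≥ 1, (x,y) inside the
-- fixed 10×10 board, but the actual matriz is too small for the scan (row y missing, or row y
-- shorter than the board and all its sea cells from x onward let the scan run off its end).
def Pre_validar_x (x : Int) (y : Int) (matriz : List (List String)) (tama_o : Int) : Prop :=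
  ¬(1 ≤ tama_o ∧ 0 ≤ x ∧ x ≤ 9 ∧ 0 ≤ y ∧ y ≤ 9 ∧
    ((matriz.length : Int) ≤ y ∨
      (((matriz.getD y.toNat []).length : Int) ≤ 9 ∧
       ((matriz.getD y.toNat []).length : Int) ≤ x + tama_o - 1 ∧
       ∀ j ∈ List.range (matriz.getD y.toNat []).length,
         x ≤ (j : Int) → (matriz.getD y.toNat []).getD j "" = " ")))
instance (x : Int) (y : Int) (matriz : List (List String)) (tama_o : Int) : Decidable (Pre_validar_x x y matriz tama_o) := by unfold Pre_validar_x; infer_instance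

def pvWitness_validar_x : Int × Int × List (List String) × Int := (0, 0, [[" ", " "]], 2)

def Spec_validar_x (x : Int) (y : Int) (matriz : List (List String)) (tama_o : Int) (out : Bool) : Prop := out = validar_x_alt x y matriz tama_o
instance (x : Int) (y : Int) (matriz : List (List String)) (tama_o : Int) (out : Bool) : Decidable (Spec_validar_x x y matriz tama_o out) := by unfold Spec_validar_x; infer_instance

-- ===== CLAIM (what is proved, stated in full; the proofs are below) =====
def Claim_equal_validar_x : Prop := ∀ (x : Int) (y : Int) (matriz : List (List String)) (tama_o : Int), Dom_validar_x x y matriz tama_o → Pre_validar_x x y matriz tama_o → Spec_validar_x x y matriz tama_o (validar_x x y matriz tama_o)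

-- ===== LEMMAS AND PROOFS =====

theorem validarXLoop_eq_all (y : Int) (m : List (List String)) (t : Int) :
    ∀ (fuel : Nat) (aux x : Int), (t + 1 - aux).toNat ≤ fuel →
      validarXLoop y m t fuel aux x =
        (List.range (t + 1 - aux).toNat).all
          (fun i => en_rango (x + i) y && es_mar (x + i) y m) := by
  intro fuel
  induction fuel with
  | zero =>
    intro aux x h
    have h0 : (t + 1 - aux).toNat = 0 := by omega
    simp [validarXLoop, h0]
  | succ n ih =>
    intro aux x h
    rw [validarXLoop]
    by_cases haux : aux ≤ t
    case neg =>
      have h0 : (t + 1 - aux).toNat = 0 := by omega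
      simp [haux, h0]
    simp only [haux, if_true]
    obtain ⟨k, hk⟩ : ∃ k, (t + 1 - aux).toNat = k + 1 := ⟨(t - aux).toNat, by omega⟩
    have hk' : (t + 1 - (aux + 1)).toNat = k := by omega
    rw [hk]
    by_cases hc : (en_rango x y && es_mar x y m) = true
    · rw [if_pos hc, ih (aux + 1) (x + 1) (by omega), hk']
      rw [List.range_succ_eq_map]
      simp only [List.all_cons, List.all_map]
      have h0 : ((0 : Nat) : Int) = 0 := rfl
      rw [show (fun i : Nat => en_rango (x + ↑i) y && es_mar (x + ↑i) y m) ∘ Nat.succ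
            = (fun i : Nat => en_rango (x + 1 + ↑i) y && es_mar (x + 1 + ↑i) y m) from ?_]
      · simp only [h0, add_zero, hc, Bool.true_and]
      · funext i
        simp only [Function.comp]
        norm_num
        ring_nf
    · rw [if_neg hc]
      rw [List.range_succ_eq_map]
      simp only [List.all_cons]
      simp only [Nat.cast_zero, add_zero]
      simp [Bool.eq_false_iff.mpr hc]

theorem validar_x_eq_all (x y : Int) (m : List (List String)) (t : Int) :
    validar_x x y m t =
      (List.range t.toNat).all (fun i => en_rango (x + i) y && es_mar (x + i) y m) := by
  rw [validar_x, validarXLoop_eq_all y m t t.toNat 1 x (by omega),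
    show (t + 1 - 1 : Int) = t from by ring]

-- ===== VERDICT (by name: the statement is the Claim_ definition above) =====
theorem validar_x_spec : Claim_equal_validar_x := by
  unfold Claim_equal_validar_x
  intro x y m t _ hpre
  unfold Spec_validar_x
  rw [validar_x_eq_all]
  unfold validar_x_alt
  by_cases ht : t ≤ 0
  · have : t.toNat = 0 := by omega
    simp [ht, this]
  · rw [if_neg ht]
    have ht1 : 1 ≤ t := by omega
    by_cases hb : (0 ≤ x ∧ x + t - 1 ≤ 9 ∧ 0 ≤ y ∧ y ≤ 9)
    · -- closed-form bounds hold: compare A's scan with B's slice-vs-replicate test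
      obtain ⟨hx0, hxt, hy0, hy9⟩ := hb
      rw [if_neg (by simp [pvCOLUMNAS, pvFILAS]; omega)]
      -- Pre_ gives: row y really exists, and ¬(short all-sea row running off the end)
      unfold Pre_validar_x at hpre
      have hnotor : ¬(((m.length : Int) ≤ y) ∨ _) := fun hor => hpre ⟨ht1, hx0, by omega, hy0, hy9, hor⟩
      have hylen : y < (m.length : Int) := by
        by_contra h; exact hnotor (Or.inl (by omega))
      set row := m.getD y.toNat [] with hrowdef
      have hylen' : y.toNat < m.length := by omega
      have hget : PySem.List.pyGet? m y = some row := by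
        rw [PySem.List.pyGet?_of_nonneg m hy0, List.getElem?_eq_getElem hylen']
        rw [hrowdef, List.getD_eq_getElem?_getD, List.getElem?_eq_getElem hylen']
        simp
      rw [hget, Option.getD_some]
      rw [PySem.List.slice_toNat row hx0 (by omega)]
      have hxt' : (x + t).toNat - x.toNat = t.toNat := by omega
      rw [hxt']
      by_cases hlong : x.toNat + t.toNat ≤ row.length
      · -- row long enough: both sides test exactly the t cells starting at x
        rw [Bool.eq_iff_iff]
        simp only [List.all_eq_true, beq_iff_eq]
        rw [List.eq_replicate_iff]
        constructor
        · intro hall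
          have hlen : ((row.drop x.toNat).take t.toNat).length = t.toNat := by
            simp [List.length_take, List.length_drop]; omega
          refine ⟨hlen, fun b hbmem => ?_⟩
          obtain ⟨i, hi, hbi⟩ := List.mem_iff_getElem.mp hbmem
          rw [hlen] at hi
          have := hall i (List.mem_range.mpr hi)
          have hr : en_rango (x + i) y = true := by
            simp [en_rango, pvCOLUMNAS, pvFILAS]; omega
          have hidx : x.toNat + i < row.length := by omega
          have hgeti : PySem.List.pyGet? row (x + i) = some row[x.toNat + i] := by
            rw [show (x + (i:Int)) = ((x.toNat + i : Nat) : Int) from by omega,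
              PySem.List.pyGet?_natCast, List.getElem?_eq_getElem hidx]
          simp only [hr, Bool.true_and, es_mar, hget, Option.bind_some, hgeti,
            Option.getD_some, beq_iff_eq, pvMAR] at this
          rw [← hbi]
          simp only [List.getElem_take, List.getElem_drop]
          exact this
        · rintro ⟨hlen, hall⟩ i hi
          have hi' := List.mem_range.mp hi
          have hr : en_rango (x + i) y = true := by
            simp [en_rango, pvCOLUMNAS, pvFILAS]; omega
          have hidx : x.toNat + i < row.length := by omega
          have hgeti : PySem.List.pyGet? row (x + i) = some row[x.toNat + i] := by
            rw [show (x + (i:Int)) = ((x.toNat + i : Nat) : Int) from by omega,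
              PySem.List.pyGet?_natCast, List.getElem?_eq_getElem hidx]
          have hmem : row[x.toNat + i] ∈ (row.drop x.toNat).take t.toNat := by
            rw [List.mem_iff_getElem]
            refine ⟨i, by rw [hlen]; exact hi', ?_⟩
            simp only [List.getElem_take, List.getElem_drop]
          have := hall _ hmem
          simp [hr, es_mar, hget, hgeti, pvMAR, this]
      · -- row too short for the span: lengths differ on B's side; Pre_ gives A a bad cell
        push Not at hlong
        have hshort : ((row.drop x.toNat).take t.toNat).length ≠ (List.replicate t.toNat pvMAR).length := by
          simp [List.length_take, List.length_drop]; omega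
        have hBfalse : ((row.drop x.toNat).take t.toNat == List.replicate t.toNat pvMAR) = false := by
          rw [beq_eq_false_iff_ne]
          intro hcontra
          exact hshort (by rw [hcontra])
        rw [hBfalse]
        -- A: Pre_'s row clause fails, so some cell from x on inside the row is not sea
        have hL9 : (row.length : Int) ≤ 9 := by omega
        have hLe : (row.length : Int) ≤ x + t - 1 := by omega
        obtain ⟨j, hjmem, hjx, hjbad⟩ := (not_forall.mp (fun hall => hnotor
          (Or.inr ⟨hL9, hLe, fun j hj hx' => by
            by_contra hne
            exact (not_and.mp (not_and.mp (hall j) hj) hx') hne⟩))).imp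
          (fun j hj => by push Not at hj; exact hj)
        rw [List.all_eq_false]
        refine ⟨(j - x.toNat : Nat), List.mem_range.mpr ?_, ?_⟩
        · have := List.mem_range.mp hjmem; omega
        · have hjlt : j < row.length := List.mem_range.mp hjmem
          have hxj' : x + ((j - x.toNat : Nat) : Int) = (j : Int) := by omega
          rw [hxj']
          have hr : en_rango (j : Int) y = true := by
            simp [en_rango, pvCOLUMNAS, pvFILAS]; omega
          have hgetj : PySem.List.pyGet? row (j : Int) = some row[j] := by
            rw [PySem.List.pyGet?_natCast, List.getElem?_eq_getElem hjlt]
          simp only [hr, Bool.true_and, es_mar, hget, Option.bind_some, hgetj,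
            Option.getD_some, pvMAR]
          have : row[j] ≠ " " := by
            have := hjbad
            rwa [List.getD_eq_getElem?_getD, List.getElem?_eq_getElem hjlt] at this
          simpa using this
    · -- bounds fail: B is False; A's scan meets a non-valid cell (Pre_ rules out the raise)
      rw [if_pos (by simp [pvCOLUMNAS, pvFILAS]; omega)]
      rw [List.all_eq_false]
      by_cases hfirst : (0 ≤ x ∧ x ≤ 9 ∧ 0 ≤ y ∧ y ≤ 9)
      · -- only the right edge can fail: x + t - 1 > 9
        obtain ⟨hx0, hx9, hy0, hy9⟩ := hfirst
        have hedge : 9 < x + t - 1 := by omega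
        unfold Pre_validar_x at hpre
        have hnotor : ¬(((m.length : Int) ≤ y) ∨ _) := fun hor => hpre ⟨ht1, hx0, hx9, hy0, hy9, hor⟩
        have hylen : y < (m.length : Int) := by
          by_contra h; exact hnotor (Or.inl (by omega))
        set row := m.getD y.toNat [] with hrowdef
        by_cases hL9 : (row.length : Int) ≤ 9
        · -- row short: some cell from x on inside the row is not sea
          have hLe : (row.length : Int) ≤ x + t - 1 := by omega
          obtain ⟨j, hjmem, hjx, hjbad⟩ := (not_forall.mp (fun hall => hnotor
            (Or.inr ⟨hL9, hLe, fun j hj hx' => by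
              by_contra hne
              exact (not_and.mp (not_and.mp (hall j) hj) hx') hne⟩))).imp
            (fun j hj => by push Not at hj; exact hj)
          refine ⟨(j - x.toNat : Nat), List.mem_range.mpr ?_, ?_⟩
          · have := List.mem_range.mp hjmem; omega
          · have hxj' : x + ((j - x.toNat : Nat) : Int) = (j : Int) := by
              have := List.mem_range.mp hjmem; omega
            rw [hxj']
            have hj9 : (j : Int) ≤ 9 := by
              have := List.mem_range.mp hjmem; omega
            have hr : en_rango (j : Int) y = true := by
              simp [en_rango, pvCOLUMNAS, pvFILAS]; omega
            have hylen' : y.toNat < m.length := by omega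
            have hget : PySem.List.pyGet? m y = some row := by
              rw [PySem.List.pyGet?_of_nonneg m hy0]
              rw [List.getElem?_eq_getElem hylen']
              rw [hrowdef, List.getD_eq_getElem?_getD, List.getElem?_eq_getElem hylen']
              simp
            have hjlt : j < row.length := List.mem_range.mp hjmem
            have hgetj : PySem.List.pyGet? row (j : Int) = some row[j] := by
              rw [PySem.List.pyGet?_natCast, List.getElem?_eq_getElem hjlt]
            simp only [hr, Bool.true_and, es_mar, hget, Option.bind_some, hgetj,
              Option.getD_some, pvMAR]
            have : row[j] ≠ " " := by
              have := hjbad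
              rwa [List.getD_eq_getElem?_getD, List.getElem?_eq_getElem hjlt] at this
            simpa using this
        · -- row long enough: the scan walks off the board's right edge at x+i = 10
          push Not at hL9
          refine ⟨(10 - x.toNat : Nat), List.mem_range.mpr (by omega), ?_⟩
          have h10 : x + ((10 - x.toNat : Nat) : Int) = 10 := by omega
          rw [h10]
          simp [en_rango, pvCOLUMNAS, pvFILAS]
      · -- (x,y) not even on the board: the very first cell fails en_rango
        refine ⟨0, List.mem_range.mpr (by omega), ?_⟩
        simp only [Nat.cast_zero, add_zero]
        have : en_rango x y = false := by
          simp [en_rango, pvCOLUMNAS, pvFILAS]; omega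
        simp [this]
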